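-- pv_equiv track=rewrite | github.com/ivana-meshed/mmm-app | app/nav/Prepare_Training_Data_old.py | _expand_with_rules
-- ===== SOURCE A (Python) =====
-- def _expand_with_rules(explicit_list, rule_tokens, dfcols):
--     """
--     Combine explicit mapping with rule-based matches.
--     Rule tokens are treated as case-insensitive 'contains' tokens.
--     """
--     dfu = [c for c in dfcols]  # preserve original case
--     dfu_l = [c.lower() for c in dfu]
--     out = set(c for c in (explicit_list or []) if c in dfu)
--     for tok in rule_tokens or []:
--         tok_l = tok.lower()
--         for col, col_l in zip(dfu, dfu_l):
--             if tok_l in col_l: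
--                 out.add(col)
--     return sorted(out)
-- ===== SOURCE B (Python) =====
-- def _insert_sorted(acc, c):
--     """Insert c into the sorted duplicate-free list acc (no-op if present)."""
--     i = 0
--     n = len(acc)
--     while i < n and acc[i] < c:
--         i += 1
--     if i < n and acc[i] == c:
--         return acc
--     acc.insert(i, c)
--     return acc
--
-- def _expand_with_rules(explicit_list, rule_tokens, dfcols):
--     """Maintain the answer as a sorted duplicate-free list built by ordered
--     insertion while scanning the columns once; no result set, no final sort."""
--     toks = [t.lower() for t in (rule_tokens or [])]
--     expl = set(explicit_list or [])
--     acc = []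
--     for c in dfcols:
--         if c in expl or any(t in c.lower() for t in toks):
--             acc = _insert_sorted(acc, c)
--     return acc
-- ===== Notes on version B (the rewrite author's own statement) =====
-- stated objective: alternative
-- what changed: Replaces A's two-phase build (seed a result set from the explicit list, then token-outer/column-inner loops adding matches, then sorted() at the end) with a single column scan that maintains the answer as a sorted duplicate-free list via ordered insertion, so there is no result set and no final sort.
import Mathlib
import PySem

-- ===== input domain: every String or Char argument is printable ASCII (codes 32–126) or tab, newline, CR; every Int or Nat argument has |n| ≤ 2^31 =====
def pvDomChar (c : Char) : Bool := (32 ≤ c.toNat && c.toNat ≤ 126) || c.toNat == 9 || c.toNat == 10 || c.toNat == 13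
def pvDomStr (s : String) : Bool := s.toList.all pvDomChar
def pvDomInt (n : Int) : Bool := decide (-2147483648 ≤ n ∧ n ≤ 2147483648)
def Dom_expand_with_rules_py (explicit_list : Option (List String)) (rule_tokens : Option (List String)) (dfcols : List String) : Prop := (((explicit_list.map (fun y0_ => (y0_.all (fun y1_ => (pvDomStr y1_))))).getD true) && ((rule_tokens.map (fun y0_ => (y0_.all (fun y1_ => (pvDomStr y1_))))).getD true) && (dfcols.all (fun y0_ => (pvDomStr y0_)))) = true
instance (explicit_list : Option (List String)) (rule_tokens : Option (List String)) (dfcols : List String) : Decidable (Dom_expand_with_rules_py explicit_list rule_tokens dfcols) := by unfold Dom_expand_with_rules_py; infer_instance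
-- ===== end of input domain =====

-- B maintains the answer as a sorted duplicate-free list built by ordered insertion during one
-- column scan, instead of A's result set filled in two phases and sorted at the end (alternative).

-- ===== PORT A =====
def expand_with_rules_py (explicit_list : Option (List String)) (rule_tokens : Option (List String)) (dfcols : List String) : List String :=
  let dfu := dfcols.map (fun c => c)
  let dfu_l := dfu.map PySem.Str.lower
  let out : PySem.Set String := PySem.Set.ofList ((explicit_list.getD []).filter (fun c => dfu.contains c))
  let out := (rule_tokens.getD []).foldl (fun out tok =>
      let tok_l := PySem.Str.lower tok
      (dfu.zip dfu_l).foldl (fun out p =>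
        if PySem.Str.isIn tok_l p.2 then PySem.Set.add out p.1 else out) out) out
  PySem.List.sorted out (fun x => x) false

-- ===== PORT B =====
-- the 'while i < n and acc[i] < c' index climb of _insert_sorted, as structural recursion
def pvInsPos (c : String) : List String → Nat
  | [] => 0
  | h :: t => if h < c then pvInsPos c t + 1 else 0

def pvInsertSorted (acc : List String) (c : String) : List String :=
  let i := pvInsPos c acc
  if acc[i]? == some c then acc
  else PySem.List.insert acc (i : Int) c

def expand_with_rules_py_alt (explicit_list : Option (List String)) (rule_tokens : Option (List String)) (dfcols : List String) : List String :=
  let toks := (rule_tokens.getD []).map PySem.Str.lower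
  let expl : PySem.Set String := PySem.Set.ofList (explicit_list.getD [])
  dfcols.foldl (fun acc c =>
    if PySem.Set.contains expl c || toks.any (fun t => PySem.Str.isIn t (PySem.Str.lower c))
    then pvInsertSorted acc c else acc) []

-- ===== PRECONDITION & SPEC =====
def Spec_expand_with_rules_py (explicit_list : Option (List String)) (rule_tokens : Option (List String)) (dfcols : List String) (out : List String) : Prop := out = expand_with_rules_py_alt explicit_list rule_tokens dfcols
instance (explicit_list : Option (List String)) (rule_tokens : Option (List String)) (dfcols : List String) (out : List String) : Decidable (Spec_expand_with_rules_py explicit_list rule_tokens dfcols out) := by unfold Spec_expand_with_rules_py; infer_instance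

-- ===== CLAIM =====
def Claim_equal_expand_with_rules_py : Prop := ∀ (explicit_list : Option (List String)) (rule_tokens : Option (List String)) (dfcols : List String), Dom_expand_with_rules_py explicit_list rule_tokens dfcols → Spec_expand_with_rules_py explicit_list rule_tokens dfcols (expand_with_rules_py explicit_list rule_tokens dfcols)

-- ===== LEMMAS AND PROOFS =====

-- membership in A's inner (column) loop
theorem pv_mem_inner (pairs : List (String × String)) (s : PySem.Set String)
    (tok_l : String) (x : String) :
    x ∈ pairs.foldl (fun out p => if PySem.Str.isIn tok_l p.2 then PySem.Set.add out p.1 else out) s ↔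
      x ∈ s ∨ ∃ p ∈ pairs, PySem.Str.isIn tok_l p.2 = true ∧ x = p.1 := by
  induction pairs generalizing s with
  | nil => simp
  | cons p t ih =>
    simp only [List.foldl_cons, ih, List.mem_cons]
    split_ifs with h
    · simp only [PySem.Set.mem_add]
      constructor
      · rintro (⟨h1 | h1⟩ | ⟨q, hq, hc, hx⟩)
        · exact Or.inl h1
        · exact Or.inr ⟨p, Or.inl rfl, h, h1⟩
        · exact Or.inr ⟨q, Or.inr hq, hc, hx⟩
      · rintro (h1 | ⟨q, (rfl | hq), hc, hx⟩)
        · exact Or.inl (Or.inl h1)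
        · exact Or.inl (Or.inr hx)
        · exact Or.inr ⟨q, hq, hc, hx⟩
    · constructor
      · rintro (h1 | ⟨q, hq, hc, hx⟩)
        · exact Or.inl h1
        · exact Or.inr ⟨q, Or.inr hq, hc, hx⟩
      · rintro (h1 | ⟨q, (rfl | hq), hc, hx⟩)
        · exact Or.inl h1
        · exact absurd hc (by simpa using h)
        · exact Or.inr ⟨q, hq, hc, hx⟩

theorem pv_mem_outer (toks : List String) (pairs : List (String × String))
    (s : PySem.Set String) (x : String) :
    x ∈ toks.foldl (fun out tok =>
        pairs.foldl (fun out p => if PySem.Str.isIn (PySem.Str.lower tok) p.2 then PySem.Set.add out p.1 else out) out) s ↔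
      x ∈ s ∨ ∃ tok ∈ toks, ∃ p ∈ pairs, PySem.Str.isIn (PySem.Str.lower tok) p.2 = true ∧ x = p.1 := by
  induction toks generalizing s with
  | nil => simp
  | cons tok t ih =>
    simp only [List.foldl_cons, ih, pv_mem_inner, List.mem_cons]
    constructor
    · rintro (⟨h1 | ⟨p, hp, hc, hx⟩⟩ | ⟨tk, htk, hrest⟩)
      · exact Or.inl h1
      · exact Or.inr ⟨tok, Or.inl rfl, p, hp, hc, hx⟩
      · exact Or.inr ⟨tk, Or.inr htk, hrest⟩
    · rintro (h1 | ⟨tk, (rfl | htk), hrest⟩)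
      · exact Or.inl (Or.inl h1)
      · exact Or.inl (Or.inr hrest)
      · exact Or.inr ⟨tk, htk, hrest⟩

theorem pvInsPos_le (c : String) (acc : List String) : pvInsPos c acc ≤ acc.length := by
  induction acc with
  | nil => simp [pvInsPos]
  | cons h t ih =>
    simp only [pvInsPos, List.length_cons]
    split_ifs <;> omega

-- structural unfolding of pvInsertSorted
theorem pvInsertSorted_nil (c : String) : pvInsertSorted [] c = [c] := by
  simp [pvInsertSorted, pvInsPos, PySem.List.insert_zero]

theorem pvInsertSorted_cons_lt (c h : String) (t : List String) (hlt : h < c) :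
    pvInsertSorted (h :: t) c = h :: pvInsertSorted t c := by
  unfold pvInsertSorted
  simp only [pvInsPos, if_pos hlt]
  have hle := pvInsPos_le c t
  rw [PySem.List.insert_natCast _ _ _ (by simpa using Nat.succ_le_succ hle),
      PySem.List.insert_natCast _ _ _ hle]
  simp only [List.getElem?_cons_succ]
  split <;> rfl

theorem pvInsertSorted_cons_ge (c h : String) (t : List String) (hge : ¬ h < c) :
    pvInsertSorted (h :: t) c = if h = c then h :: t else c :: h :: t := by
  unfold pvInsertSorted
  simp only [pvInsPos, if_neg hge]
  by_cases he : h = c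
  · simp [he]
  · simp [he, PySem.List.insert_zero]

theorem pv_mem_insertSorted (acc : List String) (c x : String) :
    x ∈ pvInsertSorted acc c ↔ x = c ∨ x ∈ acc := by
  induction acc with
  | nil => simp [pvInsertSorted_nil]
  | cons h t ih =>
    by_cases hlt : h < c
    · rw [pvInsertSorted_cons_lt c h t hlt]
      simp only [List.mem_cons, ih]
      tauto
    · rw [pvInsertSorted_cons_ge c h t hlt]
      split_ifs with he
      · subst he; simp only [List.mem_cons]; tauto
      · simp only [List.mem_cons]

theorem pv_pairwise_insertSorted (acc : List String) (c : String)
    (hs : acc.Pairwise (· < ·)) : (pvInsertSorted acc c).Pairwise (· < ·) := by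
  induction acc with
  | nil => simp [pvInsertSorted_nil]
  | cons h t ih =>
    rcases List.pairwise_cons.mp hs with ⟨hh, ht⟩
    by_cases hlt : h < c
    · rw [pvInsertSorted_cons_lt c h t hlt]
      refine List.pairwise_cons.mpr ⟨?_, ih ht⟩
      intro y hy
      rcases (pv_mem_insertSorted t c y).mp hy with rfl | hy'
      · exact hlt
      · exact hh y hy'
    · rw [pvInsertSorted_cons_ge c h t hlt]
      split_ifs with he
      · exact hs
      · refine List.pairwise_cons.mpr ⟨?_, hs⟩
        intro y hy
        rcases List.mem_cons.mp hy with rfl | hy'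
        · exact lt_of_le_of_ne (not_lt.mp hlt) (Ne.symm he)
        · exact lt_trans (lt_of_le_of_ne (not_lt.mp hlt) (Ne.symm he)) (hh y hy')

-- B's fold: sortedness and membership
theorem pv_fold_pairwise (cols : List String) (p : String → Bool) (acc : List String)
    (hs : acc.Pairwise (· < ·)) :
    (cols.foldl (fun acc c => if p c then pvInsertSorted acc c else acc) acc).Pairwise (· < ·) := by
  induction cols generalizing acc with
  | nil => exact hs
  | cons c t ih =>
    simp only [List.foldl_cons]
    split_ifs
    · exact ih _ (pv_pairwise_insertSorted _ _ hs)
    · exact ih _ hs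

theorem pv_fold_mem (cols : List String) (p : String → Bool) (acc : List String) (x : String) :
    x ∈ cols.foldl (fun acc c => if p c then pvInsertSorted acc c else acc) acc ↔
      x ∈ acc ∨ (x ∈ cols ∧ p x = true) := by
  induction cols generalizing acc with
  | nil => simp
  | cons c t ih =>
    simp only [List.foldl_cons, List.mem_cons]
    split_ifs with hc
    · rw [ih]
      simp only [pv_mem_insertSorted]
      constructor
      · rintro (⟨rfl | hx⟩ | ⟨hx, hp⟩)
        · exact Or.inr ⟨Or.inl rfl, hc⟩
        · exact Or.inl hx
        · exact Or.inr ⟨Or.inr hx, hp⟩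
      · rintro (hx | ⟨rfl | hx, hp⟩)
        · exact Or.inl (Or.inr hx)
        · exact Or.inl (Or.inl rfl)
        · exact Or.inr ⟨hx, hp⟩
    · rw [ih]
      constructor
      · rintro (hx | ⟨hx, hp⟩)
        · exact Or.inl hx
        · exact Or.inr ⟨Or.inr hx, hp⟩
      · rintro (hx | ⟨rfl | hx, hp⟩)
        · exact Or.inl hx
        · exact absurd hp (by simpa using hc)
        · exact Or.inr ⟨hx, hp⟩

theorem pv_nodup_inner (pairs : List (String × String)) (s : PySem.Set String)
    (tok_l : String) (hs : s.Nodup) :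
    (pairs.foldl (fun out p => if PySem.Str.isIn tok_l p.2 then PySem.Set.add out p.1 else out) s).Nodup := by
  induction pairs generalizing s with
  | nil => exact hs
  | cons p t ih =>
    simp only [List.foldl_cons]
    split_ifs
    · exact ih _ (PySem.Set.nodup_add _ _ hs)
    · exact ih _ hs

theorem pv_nodup_outer (toks : List String) (pairs : List (String × String))
    (s : PySem.Set String) (hs : s.Nodup) :
    (toks.foldl (fun out tok =>
        pairs.foldl (fun out p => if PySem.Str.isIn (PySem.Str.lower tok) p.2 then PySem.Set.add out p.1 else out) out) s).Nodup := by
  induction toks generalizing s with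
  | nil => exact hs
  | cons tok t ih => exact ih _ (pv_nodup_inner _ _ _ hs)

-- ===== VERDICT =====
theorem expand_with_rules_py_spec : Claim_equal_expand_with_rules_py := by
  intro el rt dfcols _
  unfold Spec_expand_with_rules_py expand_with_rules_py expand_with_rules_py_alt
  simp only [List.map_id']
  set p : String → Bool := fun c =>
    PySem.Set.contains (PySem.Set.ofList (el.getD [])) c ||
      ((rt.getD []).map PySem.Str.lower).any (fun t => PySem.Str.isIn t (PySem.Str.lower c)) with hp
  have hpw : (dfcols.foldl (fun acc c => if p c then pvInsertSorted acc c else acc) []).Pairwise (· < ·) :=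
    pv_fold_pairwise _ _ _ (by simp)
  refine PySem.List.sorted_eq_of_perm_of_pairwise_lt _ _ _ ?_ hpw
  rw [List.perm_ext_iff_of_nodup (hpw.imp ne_of_lt)
        (pv_nodup_outer _ _ _ (PySem.Set.nodup_ofList _))]
  intro x
  have hzip : dfcols.zip (dfcols.map PySem.Str.lower)
      = dfcols.map (fun c => (c, PySem.Str.lower c)) := by
    simpa using List.zip_map' (f := id) (g := PySem.Str.lower) (l := dfcols)
  rw [hzip, pv_mem_outer, pv_fold_mem]
  simp only [PySem.Set.mem_ofList, List.mem_filter, List.mem_map, List.any_eq_true,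
    Bool.or_eq_true, PySem.Set.contains_eq_listContains, List.contains_iff_mem, hp]
  aesop
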